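-- pv_equiv track=rewrite | github.com/kirilldi/study_2022-2023_mathsec | labs/lab2/column-transpostion.py | convert_string_to_matrix
-- ===== SOURCE A (Python) =====
-- def convert_string_to_matrix(string, column_no, matrix, matrix_level):
--     for v in string:
--         if len(matrix[matrix_level]) == column_no:
--             matrix_level = matrix_level + 1
--             matrix.append([v])
--         else:
--             matrix[matrix_level].append(v)
--
--     return matrix, matrix_level
-- ===== SOURCE B (Python) =====
-- def convert_string_to_matrix(string, column_no, matrix, matrix_level):
--     # Slice-chunking rewrite: top up the last row with one slice, then append
--     # the rest of the characters as whole rows of column_no at a time.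
--     if not string:
--         return matrix, matrix_level
--     chars = list(string)
--     row = matrix[matrix_level]
--     space = column_no - len(row)
--     if space > 0:
--         row.extend(chars[:space])
--         chars = chars[space:]
--     while chars:
--         matrix.append(chars[:column_no])
--         chars = chars[column_no:]
--         matrix_level += 1
--     return matrix, matrix_level
-- ===== Notes on version B (the rewrite author's own statement) =====
-- stated objective: alternative
-- what changed: B replaces A's per-character fill-or-new-row branch by slice-chunking: it tops up the current last row with one slice and then appends the remaining characters as whole rows of column_no at a time, branching once per row instead of once per character; …
-- outside the precondition, e.g. on convert_string_to_matrix('a', 1, [['x', 'y']], 0): A returns ([['x', 'y', 'a']], 0), B returns ([['x', 'y'], ['a']], 1); on convert_string_to_matrix('a', -1, [[]], 0): A returns ([['a']], 0), B does not finish within the time limit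
import Mathlib
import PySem

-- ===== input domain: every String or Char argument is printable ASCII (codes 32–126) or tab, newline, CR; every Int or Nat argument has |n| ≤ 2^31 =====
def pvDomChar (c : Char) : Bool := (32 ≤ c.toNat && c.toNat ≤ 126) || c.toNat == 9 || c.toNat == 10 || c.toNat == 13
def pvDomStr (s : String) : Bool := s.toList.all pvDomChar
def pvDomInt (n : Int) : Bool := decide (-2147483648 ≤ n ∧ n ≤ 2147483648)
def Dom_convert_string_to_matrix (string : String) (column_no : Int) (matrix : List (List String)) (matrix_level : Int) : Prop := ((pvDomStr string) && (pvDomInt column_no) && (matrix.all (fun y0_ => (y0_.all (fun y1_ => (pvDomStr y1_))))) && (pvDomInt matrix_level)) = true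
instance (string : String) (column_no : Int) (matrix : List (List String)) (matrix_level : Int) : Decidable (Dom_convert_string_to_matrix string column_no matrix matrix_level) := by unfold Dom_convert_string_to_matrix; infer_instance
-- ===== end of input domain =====

-- B replaces A's per-character fill-or-new-row branch by slice-chunking (top up the last row
-- once, then append whole rows of column_no characters); both Pythons mutate `matrix` in
-- place — the theorems below are about the return value only.

-- ===== PORT A =====
def convert_string_to_matrix (string : String) (column_no : Int) (matrix : List (List String)) (matrix_level : Int) : List (List String) × Int :=
  string.toList.foldl (fun st v =>
    match PySem.List.pyGet? st.1 st.2 with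
    | none => st   -- Python raises IndexError here; excluded by Pre_
    | some row =>
      if (row.length : Int) = column_no then
        (st.1 ++ [[String.singleton v]], st.2 + 1)
      else
        (PySem.List.pySetD st.1 st.2 (row ++ [String.singleton v]), st.2))
    (matrix, matrix_level)

-- ===== PORT B =====
-- B-side helper: the while-loop of Source B. `fuel` only makes the recursion total: under Pre_
-- (column_no ≥ 1) each iteration consumes at least one character, so one unit of fuel per
-- remaining character suffices; for column_no ≤ 0 the Python loop does not terminate.
def bChunk (column_no : Int) : Nat → List String → List (List String) → Int → List (List String) × Int
  | _, [], m, lvl => (m, lvl)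
  | 0, _ :: _, m, lvl => (m, lvl)
  | fuel + 1, h :: t, m, lvl =>
      bChunk column_no fuel (PySem.List.slice (h :: t) (some column_no) none)
        (m ++ [PySem.List.slice (h :: t) none (some column_no)]) (lvl + 1)

def convert_string_to_matrix_alt (string : String) (column_no : Int) (matrix : List (List String)) (matrix_level : Int) : List (List String) × Int :=
  if string.toList = [] then (matrix, matrix_level)
  else
    match PySem.List.pyGet? matrix matrix_level with
    | none => (matrix, matrix_level)   -- Python raises IndexError here; excluded by Pre_
    | some row =>
      let chars : List String := string.toList.map String.singleton
      let space : Int := column_no - row.length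
      let st :=
        if 0 < space then
          (PySem.List.pySetD matrix matrix_level (row ++ PySem.List.slice chars none (some space)),
           PySem.List.slice chars (some space) none)
        else (matrix, chars)
      bChunk column_no st.2.length st.2 st.1 matrix_level

-- ===== PRECONDITION & SPEC =====
-- Pre_ restricts to the function's natural domain: matrix is nonempty, matrix_level is the
-- index of the LAST row (the row being filled), that row holds at most column_no cells, and
-- column_no is positive.  Outside it A either raises IndexError (matrix_level out of range
-- for a nonempty string) or, where it still returns (a mid-matrix or negative matrix_level,
-- a non-positive column_no, an over-full current row), its values are artefacts of the
-- per-character rescan (characters spill into unrelated rows, or everything is dumped into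
-- one over-full row); B raises or diverges on part of that region and returns other values
-- on the rest.  The third disjunct additionally admits any in-range row index whenever the
-- whole string fits into that row's remaining space (no row is ever appended there).
def Pre_convert_string_to_matrix (string : String) (column_no : Int) (matrix : List (List String)) (matrix_level : Int) : Prop :=
  string = "" ∨
    (matrix ≠ [] ∧ matrix_level = (matrix.length : Int) - 1 ∧ 1 ≤ column_no ∧
      ((matrix.getLastD []).length : Int) ≤ column_no) ∨
    (0 ≤ matrix_level ∧ matrix_level < (matrix.length : Int) ∧ 1 ≤ column_no ∧
      (string.toList.length : Int) ≤ column_no - ((matrix.getD matrix_level.toNat []).length : Int))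
instance (string : String) (column_no : Int) (matrix : List (List String)) (matrix_level : Int) : Decidable (Pre_convert_string_to_matrix string column_no matrix matrix_level) := by unfold Pre_convert_string_to_matrix; infer_instance

def pvWitness_convert_string_to_matrix : String × Int × List (List String) × Int := ("abcde", 2, [["x"]], 0)

def Spec_convert_string_to_matrix (string : String) (column_no : Int) (matrix : List (List String)) (matrix_level : Int) (out : List (List String) × Int) : Prop := out = convert_string_to_matrix_alt string column_no matrix matrix_level
instance (string : String) (column_no : Int) (matrix : List (List String)) (matrix_level : Int) (out : List (List String) × Int) : Decidable (Spec_convert_string_to_matrix string column_no matrix matrix_level out) := by unfold Spec_convert_string_to_matrix; infer_instance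

-- ===== CLAIM =====
def Claim_equal_convert_string_to_matrix : Prop := ∀ (string : String) (column_no : Int) (matrix : List (List String)) (matrix_level : Int), Dom_convert_string_to_matrix string column_no matrix matrix_level → Pre_convert_string_to_matrix string column_no matrix matrix_level → Spec_convert_string_to_matrix string column_no matrix matrix_level (convert_string_to_matrix string column_no matrix matrix_level)

-- ===== LEMMAS AND PROOFS =====

-- A's loop, restated as structural recursion on the character list.
def aFold (c : Int) : List Char → List (List String) → Int → List (List String) × Int
  | [], m, lvl => (m, lvl)
  | v :: rest, m, lvl =>
    match PySem.List.pyGet? m lvl with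
    | none => aFold c rest m lvl
    | some row =>
      if (row.length : Int) = c then
        aFold c rest (m ++ [[String.singleton v]]) (lvl + 1)
      else
        aFold c rest (PySem.List.pySetD m lvl (row ++ [String.singleton v])) lvl

theorem conv_eq_aFold (s : String) (c : Int) (m : List (List String)) (l : Int) :
    convert_string_to_matrix s c m l = aFold c s.toList m l := by
  unfold convert_string_to_matrix
  generalize s.toList = cs
  induction cs generalizing m l with
  | nil => simp [aFold]
  | cons v rest ih =>
    rw [List.foldl_cons]
    simp only [aFold]
    cases hget : PySem.List.pyGet? m l with
    | none => simpa [hget] using ih m l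
    | some row =>
      by_cases heq : (row.length : Int) = c
      · simpa [hget, heq] using ih (m ++ [[String.singleton v]]) (l + 1)
      · simpa [hget, heq] using ih (PySem.List.pySetD m l (row ++ [String.singleton v])) l

theorem pySetD_self_of_get {α : Type} (m : List α) (i : Int) (row : α)
    (h : PySem.List.pyGet? m i = some row) : PySem.List.pySetD m i row = m := by
  simp only [PySem.List.pyGet?] at h
  cases hj : PySem.List.pyIdx? m.length i with
  | none => simp [PySem.List.pySetD, PySem.List.pySet?, hj]
  | some j =>
    rw [hj] at h
    simp only [Option.bind_some] at h
    obtain ⟨hlt, heq⟩ := List.getElem?_eq_some_iff.mp h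
    simp [PySem.List.pySetD, PySem.List.pySet?, hj, ← heq, List.set_getElem_self hlt]

theorem pyGet?_pySetD_of_get {α : Type} (m : List α) (i : Int) (row x : α)
    (h : PySem.List.pyGet? m i = some row) :
    PySem.List.pyGet? (PySem.List.pySetD m i x) i = some x := by
  simp only [PySem.List.pyGet?] at h ⊢
  rw [PySem.List.length_pySetD]
  cases hj : PySem.List.pyIdx? m.length i with
  | none => rw [hj] at h; simp at h
  | some j =>
    rw [hj] at h
    simp only [Option.bind_some] at h
    obtain ⟨hlt, -⟩ := List.getElem?_eq_some_iff.mp h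
    simp [PySem.List.pySetD, PySem.List.pySet?, hj, List.getElem?_set_self hlt]

theorem pySetD_pySetD_of_get {α : Type} (m : List α) (i : Int) (x y : α) :
    PySem.List.pySetD (PySem.List.pySetD m i x) i y = PySem.List.pySetD m i y := by
  simp only [PySem.List.pySetD, PySem.List.pySet?]
  cases hj : PySem.List.pyIdx? m.length i with
  | none => simp [hj]
  | some j =>
    simp only [Option.map_some, Option.getD_some]
    rw [List.length_set, hj]
    simp [List.set_set]

-- filling k characters one by one into the (non-full) current row
theorem aFold_fill (c : Int) (k : Nat) :
    ∀ (cs : List Char) (m : List (List String)) (lvl : Int) (row : List String),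
    PySem.List.pyGet? m lvl = some row → (row.length : Int) + k = c →
    aFold c cs m lvl =
      aFold c (cs.drop k) (PySem.List.pySetD m lvl (row ++ (cs.take k).map String.singleton)) lvl := by
  induction k with
  | zero => intro cs m lvl row h hk; simp [pySetD_self_of_get m lvl row h]
  | succ k ih =>
    intro cs m lvl row h hk
    cases cs with
    | nil => simp [aFold, pySetD_self_of_get m lvl row h]
    | cons v rest =>
      have hne : ¬ ((row.length : Int) = c) := by omega
      simp only [aFold, h, hne, if_false]
      rw [ih rest _ lvl (row ++ [String.singleton v]) (pyGet?_pySetD_of_get m lvl row _ h)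
        (by simp; omega)]
      rw [pySetD_pySetD_of_get]
      simp

theorem set_last_eq {α : Type} (m : List α) (hm : m ≠ []) (x : α) :
    m.set (m.length - 1) x = m.dropLast ++ [x] := by
  induction m with
  | nil => exact absurd rfl hm
  | cons a t ih =>
    cases t with
    | nil => rfl
    | cons b u =>
      simp only [List.length_cons, Nat.add_sub_cancel, List.set_cons_succ,
        List.dropLast_cons_of_ne_nil (by simp : (b :: u) ≠ []), List.cons_append]
      have := ih (by simp)
      simpa using this

theorem pyGet?_last (m : List (List String)) (hm : m ≠ []) :
    PySem.List.pyGet? m ((m.length : Int) - 1) = some (m.getLastD []) := by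
  have hlen : 0 < m.length := List.length_pos_iff.mpr hm
  have h1 : ((m.length : Int) - 1) = ((m.length - 1 : Nat) : Int) := by omega
  rw [h1, PySem.List.pyGet?_natCast]
  rw [List.getElem?_eq_getElem (by omega)]
  rw [List.getLastD_eq_getLast?, List.getLast?_eq_getElem?,
    List.getElem?_eq_getElem (by omega : m.length - 1 < m.length)]
  rfl

theorem pySetD_last (m : List (List String)) (hm : m ≠ []) (x : List String) :
    PySem.List.pySetD m ((m.length : Int) - 1) x = m.dropLast ++ [x] := by
  have hlen : 0 < m.length := List.length_pos_iff.mpr hm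
  have h1 : ((m.length : Int) - 1) = ((m.length - 1 : Nat) : Int) := by omega
  rw [h1, PySem.List.pySetD_natCast]
  exact set_last_eq m hm x

-- one step of B's chunk loop, with the slices evaluated
theorem bChunk_cons (c : Int) (hc : 1 ≤ c) (f : Nat) (h : String) (t : List String)
    (m : List (List String)) (lvl : Int) :
    bChunk c (f + 1) (h :: t) m lvl
      = bChunk c f ((h :: t).drop c.toNat) (m ++ [(h :: t).take c.toNat]) (lvl + 1) := by
  rw [bChunk, PySem.List.slice_from _ (by omega : (0:Int) ≤ c),
    PySem.List.slice_to _ (by omega : (0:Int) ≤ c)]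

-- the chunk loop's value does not depend on the fuel once there is enough of it
theorem bChunk_fuel (c : Int) (hc : 1 ≤ c) :
    ∀ (f1 f2 : Nat) (chars : List String) (m : List (List String)) (lvl : Int),
    chars.length ≤ f1 → chars.length ≤ f2 →
    bChunk c f1 chars m lvl = bChunk c f2 chars m lvl := by
  intro f1
  induction f1 with
  | zero =>
    intro f2 chars m lvl h1 h2
    have : chars = [] := by cases chars <;> simp_all
    subst this
    cases f2 <;> rfl
  | succ f1 ih =>
    intro f2 chars m lvl h1 h2
    cases chars with
    | nil => cases f2 <;> rfl
    | cons h t =>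
      cases f2 with
      | zero => simp at h2
      | succ f2 =>
        rw [bChunk_cons c hc, bChunk_cons c hc]
        have hlen : ((h :: t).drop c.toNat).length ≤ f1 := by
          simp only [List.length_drop, List.length_cons] at *
          omega
        have hlen2 : ((h :: t).drop c.toNat).length ≤ f2 := by
          simp only [List.length_drop, List.length_cons] at *
          omega
        exact ih f2 _ _ _ hlen hlen2

-- A chunks like B once the current (last) row is exactly full.
theorem aFold_chunk (c : Int) (hc : 1 ≤ c) :
    ∀ (n : Nat) (cs : List Char), cs.length ≤ n →
    ∀ (m : List (List String)), m ≠ [] → ((m.getLastD []).length : Int) = c →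
    aFold c cs m ((m.length : Int) - 1) =
      bChunk c cs.length (cs.map String.singleton) m ((m.length : Int) - 1) := by
  intro n
  induction n with
  | zero =>
    intro cs hcs m hm hfull
    have : cs = [] := by cases cs <;> simp_all
    subst this
    simp [aFold, bChunk]
  | succ n ih =>
    intro cs hcs m hm hfull
    cases cs with
    | nil => simp [aFold, bChunk]
    | cons v rest =>
      have hget : PySem.List.pyGet? m ((m.length : Int) - 1) = some (m.getLastD []) :=
        pyGet?_last m hm
      have step1 : aFold c (v :: rest) m ((m.length : Int) - 1)
          = aFold c rest (m ++ [[String.singleton v]]) ((m.length : Int) - 1 + 1) := by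
        have hfull' : ((m.getLast?.getD []).length : Int) = c := by
          rw [← List.getLastD_eq_getLast?]; exact hfull
        simp [aFold, hget, hfull']
      set m' : List (List String) := m ++ [[String.singleton v]] with hm'
      have hm'ne : m' ≠ [] := by simp [hm']
      have hlvl' : (m.length : Int) - 1 + 1 = (m'.length : Int) - 1 := by simp [hm']
      have hget' : PySem.List.pyGet? m' ((m'.length : Int) - 1) = some [String.singleton v] := by
        rw [pyGet?_last m' hm'ne]
        simp [hm']
      set k : Nat := (c - 1).toNat with hk
      have hkc : (([String.singleton v] : List String).length : Int) + (k : Int) = c := by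
        simp only [List.length_cons, List.length_nil]
        omega
      have step2 : aFold c rest m' ((m'.length : Int) - 1)
          = aFold c (rest.drop k)
              (PySem.List.pySetD m' ((m'.length : Int) - 1)
                ([String.singleton v] ++ (rest.take k).map String.singleton))
              ((m'.length : Int) - 1) :=
        aFold_fill c k rest m' ((m'.length : Int) - 1) _ hget' hkc
      set newrow : List String := [String.singleton v] ++ (rest.take k).map String.singleton with hnr
      have hsetlast : PySem.List.pySetD m' ((m'.length : Int) - 1) newrow = m ++ [newrow] := by
        rw [pySetD_last m' hm'ne]
        simp [hm']
      have hctoNat : c.toNat = k + 1 := by omega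
      have htake : ((v :: rest).map String.singleton).take c.toNat
          = newrow := by
        simp [hctoNat, hnr, List.map_take]
      have hdrop : ((v :: rest).map String.singleton).drop c.toNat
          = (rest.drop k).map String.singleton := by
        simp [hctoNat, List.map_drop]
      -- B side: one chunk step, then fuel renormalised to the remaining length
      have hB : bChunk c (v :: rest).length ((v :: rest).map String.singleton) m
            ((m.length : Int) - 1)
          = bChunk c ((rest.drop k).map String.singleton).length
              ((rest.drop k).map String.singleton) (m ++ [newrow]) ((m.length : Int) - 1 + 1) := by
        show bChunk c (rest.length + 1) (String.singleton v :: rest.map String.singleton) m _ = _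
        rw [bChunk_cons c hc]
        have h1 : (String.singleton v :: rest.map String.singleton)
            = ((v :: rest).map String.singleton) := by simp
        rw [h1, htake, hdrop]
        exact bChunk_fuel c hc rest.length _ _ _ _ (by simp [List.length_drop]) le_rfl
      rw [step1, hlvl', step2, hsetlast, hB, ← hlvl']
      by_cases hrest : k ≤ rest.length
      · set m2 : List (List String) := m ++ [newrow] with hm2
        have hm2ne : m2 ≠ [] := by simp [hm2]
        have hfull2 : ((m2.getLastD []).length : Int) = c := by
          simp only [hm2, List.getLastD_concat, hnr]
          simp only [List.length_append, List.length_map, List.length_take,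
            List.length_cons, List.length_nil]
          omega
        have hlvl2 : (m.length : Int) - 1 + 1 = (m2.length : Int) - 1 := by simp [hm2]
        rw [hlvl2]
        have := ih (rest.drop k) (by simp only [List.length_drop]; simp only [List.length_cons] at hcs; omega) m2 hm2ne hfull2
        simpa using this
      · have hnil : rest.drop k = [] := by
          rw [List.drop_eq_nil_iff]
          omega
        rw [hnil]
        simp [aFold, bChunk]

-- ===== VERDICT =====
theorem convert_string_to_matrix_spec : Claim_equal_convert_string_to_matrix := by
  intro s c m l _ hpre
  unfold Spec_convert_string_to_matrix
  by_cases hsnil : s.toList = []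
  · rw [conv_eq_aFold, hsnil]
    simp [aFold, convert_string_to_matrix_alt, hsnil]
  rcases hpre with hs | ⟨hm, hl, hc, hlast⟩ | ⟨hl0, hllen, hc, hfit⟩
  · exact absurd (by rw [hs]; rfl) hsnil
  · subst hl
    have hget : PySem.List.pyGet? m ((m.length : Int) - 1) = some (m.getLastD []) :=
      pyGet?_last m hm
    set L : List String := m.getLastD [] with hL
    rw [conv_eq_aFold]
    unfold convert_string_to_matrix_alt
    rw [if_neg hsnil, hget]
    simp only
    by_cases hspace : 0 < c - (L.length : Int)
    · rw [if_pos hspace]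
      set k : Nat := (c - (L.length : Int)).toNat with hk
      have hkc : (L.length : Int) + (k : Int) = c := by omega
      have hA := aFold_fill c k s.toList m ((m.length : Int) - 1) L hget hkc
      have hslice_to : PySem.List.slice (s.toList.map String.singleton) none (some (c - (L.length : Int)))
          = (s.toList.take k).map String.singleton := by
        rw [PySem.List.slice_to _ (by omega : (0:Int) ≤ c - (L.length : Int))]
        simp [hk, List.map_take]
      have hslice_from : PySem.List.slice (s.toList.map String.singleton) (some (c - (L.length : Int))) none
          = (s.toList.drop k).map String.singleton := by
        rw [PySem.List.slice_from _ (by omega : (0:Int) ≤ c - (L.length : Int))]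
        simp [hk, List.map_drop]
      rw [hA, hslice_to, hslice_from, pySetD_last m hm]
      set newrow : List String := L ++ (s.toList.take k).map String.singleton with hnr
      set m2 : List (List String) := m.dropLast ++ [newrow] with hm2
      have hm2ne : m2 ≠ [] := by simp [hm2]
      have hm2len : (m2.length : Int) = (m.length : Int) := by
        simp [hm2, List.length_dropLast, List.length_pos_iff.mpr hm]
      have hlvl2 : (m.length : Int) - 1 = (m2.length : Int) - 1 := by omega
      by_cases hrest : k ≤ s.toList.length
      · by_cases hknil : s.toList.drop k = []
        · rw [hknil]
          simp [aFold, bChunk]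
        · have hfull2 : ((m2.getLastD []).length : Int) = c := by
            simp only [hm2, List.getLastD_concat, hnr]
            simp only [List.length_append, List.length_map, List.length_take]
            omega
          rw [hlvl2]
          have := aFold_chunk c (by omega) (s.toList.drop k).length (s.toList.drop k) le_rfl m2 hm2ne hfull2
          simpa using this
      · have hnil : s.toList.drop k = [] := by
          rw [List.drop_eq_nil_iff]
          omega
        rw [hnil]
        simp [aFold, bChunk]
    · rw [if_neg hspace]
      have hfull : ((L).length : Int) = c := by omega
      have := aFold_chunk c hc s.toList.length s.toList le_rfl m hm (by rw [← hL]; exact hfull)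
      simpa using this
  · -- the string fits into the remaining space of row matrix_level: no row is appended
    set L : List String := m.getD l.toNat [] with hL
    have hltoNat : l = ((l.toNat : Nat) : Int) := by omega
    have hlt : l.toNat < m.length := by omega
    have hget : PySem.List.pyGet? m l = some L := by
      rw [hltoNat, PySem.List.pyGet?_natCast, List.getElem?_eq_getElem hlt]
      simp [hL, List.getD_eq_getElem?_getD, List.getElem?_eq_getElem hlt]
    have hpos : 0 < (s.toList.length : Int) := by
      have := List.length_pos_iff.mpr hsnil
      omega
    set k : Nat := (c - (L.length : Int)).toNat with hk
    have hkc : (L.length : Int) + (k : Int) = c := by omega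
    have hfitk : s.toList.length ≤ k := by omega
    rw [conv_eq_aFold, aFold_fill c k s.toList m l L hget hkc,
      List.drop_eq_nil_iff.mpr hfitk, List.take_of_length_le hfitk]
    unfold convert_string_to_matrix_alt
    rw [if_neg hsnil, hget]
    simp only
    rw [if_pos (by omega : 0 < c - (L.length : Int))]
    rw [PySem.List.slice_to _ (by omega : (0:Int) ≤ c - (L.length : Int)),
      PySem.List.slice_from _ (by omega : (0:Int) ≤ c - (L.length : Int))]
    rw [List.take_of_length_le (by rw [List.length_map, ← hk]; exact hfitk),
      List.drop_eq_nil_iff.mpr (by rw [List.length_map, ← hk]; exact hfitk)]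
    simp [aFold, bChunk]
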